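-- pv_equiv track=rewrite | github.com/Romcast/Ancien-projets | CHIFFRES ET LETTRES.py | verifc
-- ===== SOURCE A (Python) =====
-- def verifc(l,comb):
--     """ verifc(liste,chaine) -> booléen     vérifie si tous les nombres de la combinaison sont présents une seule fois dans la liste """
--     ll = l.copy()
--     n = ''
--     for i in range(len(comb)+1):
--         try:    # on vérifie si on prend bien un chiffre et on l'ajoute à l'autre
--             int(comb[i])
--             n += comb[i]
--         except:     # dès qu'il n'y a plus de chiffres on vérifie si le nombre formé avec les chiffres est dans la liste
--             try:
--                 int(n)
--                 if int(n) in ll: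
--                     ll.remove(int(n))
--                 else:
--                     return False
--                 n = ''
--             except:
--                 pass
--     return True
-- ===== SOURCE B (Python) =====
-- def verifc(l, comb):
--     """ verifc(liste,chaine) -> booléen     vérifie si tous les nombres de la combinaison sont présents une seule fois dans la liste """
--     # Pass 1: extract the numbers of comb by scanning maximal digit runs with an index.
--     need = []
--     i = 0
--     while i < len(comb):
--         if comb[i].isdigit():
--             j = i
--             while j < len(comb) and comb[j].isdigit():
--                 j += 1
--             need.append(int(comb[i:j]))
--             i = j
--         else:
--             i += 1
--     # Pass 2: sort both sides, then a two-pointer merge scan decides whether the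
--     # sorted token list is a subsequence of the sorted pool, i.e. a sub-multiset of l.
--     need.sort()
--     k = 0
--     for x in sorted(l):
--         if k < len(need) and need[k] == x:
--             k += 1
--     return k == len(need)
-- ===== Notes on version B (the rewrite author's own statement) =====
-- stated objective: faster
-- what changed: A interleaves char-by-char digit accumulation (via try/except) with a membership-test-plus-list.remove against a mutable copy of l; B first extracts all numbers by an index scan over digit runs, then sorts both the token list and l and decides sub-multiset containment with a single two-pointer merge scan (sorted subsequence test), with no removal or repeated search.
import Mathlib
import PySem

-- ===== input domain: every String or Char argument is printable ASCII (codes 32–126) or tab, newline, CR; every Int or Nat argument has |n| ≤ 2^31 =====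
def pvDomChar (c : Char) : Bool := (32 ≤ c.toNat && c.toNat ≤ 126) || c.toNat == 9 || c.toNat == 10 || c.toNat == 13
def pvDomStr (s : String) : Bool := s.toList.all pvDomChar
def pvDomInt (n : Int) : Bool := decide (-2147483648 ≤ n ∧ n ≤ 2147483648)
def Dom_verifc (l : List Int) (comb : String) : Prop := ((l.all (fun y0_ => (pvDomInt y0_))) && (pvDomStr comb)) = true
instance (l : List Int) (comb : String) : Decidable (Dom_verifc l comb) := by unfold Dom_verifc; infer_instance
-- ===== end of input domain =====

-- B replaces A's interleaved char-accumulation / membership-and-list.remove loop by: extract all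
-- numbers with an index scan over maximal digit runs, sort both the token list and l, and decide
-- sub-multiset containment with a single two-pointer merge scan (sorted-subsequence test).

-- ===== PORT A =====
-- int(n) for the accumulated run n: n is always a (possibly empty) run of digit chars,
-- int('') raises (→ the 'pass' branch, guarded by n.isEmpty below), otherwise ofChars? is some.
def verifcAVal (n : List Char) : Int := (PySem.Int.ofChars? n).getD 0

-- the for-loop over i in range(len(comb)+1): the c :: cs case is an in-range i (int(comb[i])
-- succeeds on the Dom's ASCII chars exactly when the char is a digit), the [] case is i = len(comb),
-- where comb[i] raises IndexError and the except branch flushes the pending run n.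
def verifcALoop (ll : List Int) (n : List Char) : List Char → Bool
  | c :: cs =>
      if PySem.Chars.isdigit c then verifcALoop ll (n ++ [c]) cs
      else if n.isEmpty then verifcALoop ll n cs      -- int('') raises → pass
      else if ll.contains (verifcAVal n) then
        verifcALoop ((PySem.List.remove? ll (verifcAVal n)).getD ll) [] cs
      else false
  | [] =>
      if n.isEmpty then true
      else if ll.contains (verifcAVal n) then true    -- remove, n = '', then the loop ends
      else false

def verifc (l : List Int) (comb : String) : Bool := verifcALoop l [] comb.toList

-- ===== PORT B =====
-- pass 1 of Source B: the outer while over i skips a non-digit, and at a digit the inner j-loop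
-- advances over the maximal digit run (takeWhile) and appends int(comb[i:j]); i = j resumes
-- right after the run (dropWhile).
def verifcBTok : List Char → List Int
  | [] => []
  | c :: cs =>
      if PySem.Chars.isdigit c then
        (PySem.Int.ofChars? ((c :: cs).takeWhile PySem.Chars.isdigit)).getD 0
          :: verifcBTok ((c :: cs).dropWhile PySem.Chars.isdigit)
      else verifcBTok cs
termination_by cs => cs.length
decreasing_by
  · simp only [List.dropWhile_cons, *, if_pos]
    exact Nat.lt_succ_of_le (List.length_dropWhile_le _ _)
  · simp

-- pass 2 of Source B: need.sort(); the two-pointer for-loop over sorted(l); return k == len(need)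
def verifc_alt (l : List Int) (comb : String) : Bool :=
  let need := PySem.List.sorted (verifcBTok comb.toList) (fun x => x) false
  let k := (PySem.List.sorted l (fun x => x) false).foldl
      (fun k x => if k < need.length && need.getD k 0 == x then k + 1 else k) 0
  k == need.length

-- ===== PRECONDITION & SPEC =====
def Spec_verifc (l : List Int) (comb : String) (out : Bool) : Prop := out = verifc_alt l comb
instance (l : List Int) (comb : String) (out : Bool) : Decidable (Spec_verifc l comb out) := by unfold Spec_verifc; infer_instance

-- ===== CLAIM =====
def Claim_equal_verifc : Prop := ∀ (l : List Int) (comb : String), Dom_verifc l comb → Spec_verifc l comb (verifc l comb)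

-- ===== LEMMAS AND PROOFS =====

-- reference tokenizer: the maximal digit runs of a char list, with pending run n
def pvToks (n : List Char) : List Char → List (List Char)
  | c :: cs =>
      if PySem.Chars.isdigit c then pvToks (n ++ [c]) cs
      else if n.isEmpty then pvToks [] cs
      else n :: pvToks [] cs
  | [] => if n.isEmpty then [] else [n]

-- reference checker: A's membership-and-remove pass, over a ready token list
def pvChk (ll : List Int) : List (List Char) → Bool
  | [] => true
  | t :: ts =>
      if ll.contains (verifcAVal t) then
        pvChk ((PySem.List.remove? ll (verifcAVal t)).getD ll) ts
      else false

-- greedy reference for B's two-pointer loop: the unmatched remainder of nd after scanning hv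
def pvGreedy : List Int → List Int → List Int
  | nd, [] => nd
  | nd, x :: hv =>
      match nd with
      | [] => []
      | n :: nd' => if n = x then pvGreedy nd' hv else pvGreedy (n :: nd') hv

theorem verifcALoop_eq_chk (cs : List Char) : ∀ (ll : List Int) (n : List Char),
    verifcALoop ll n cs = pvChk ll (pvToks n cs) := by
  induction cs with
  | nil =>
      intro ll n
      by_cases h : n.isEmpty
      · simp [verifcALoop, pvToks, h, pvChk]
      · by_cases hc : ll.contains (verifcAVal n) <;>
          simp [verifcALoop, pvToks, h, pvChk]
  | cons c cs ih =>
      intro ll n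
      by_cases hd : PySem.Chars.isdigit c
      · simp [verifcALoop, pvToks, hd, ih]
      · by_cases h : n.isEmpty
        · obtain rfl := List.isEmpty_iff.mp h
          simp [verifcALoop, pvToks, hd, ih]
        · by_cases hc : ll.contains (verifcAVal n) <;>
            simp [verifcALoop, pvToks, hd, h, pvChk, ih]

-- feeding an all-digit prefix into pvToks just moves it into the pending run
theorem pvToks_append (n : List Char) : ∀ (m cs : List Char),
    (∀ c ∈ n, PySem.Chars.isdigit c = true) → pvToks m (n ++ cs) = pvToks (m ++ n) cs := by
  induction n with
  | nil => intro m cs _; simp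
  | cons d n ih =>
      intro m cs hall
      have hd : PySem.Chars.isdigit d = true := hall d (by simp)
      rw [List.cons_append, pvToks, if_pos hd, ih (m ++ [d]) cs (fun c hc => hall c (by simp [hc]))]
      simp

-- B's tokenizer produces exactly the values of the maximal digit runs
theorem bTok_eq_toks (cs : List Char) : verifcBTok cs = (pvToks [] cs).map verifcAVal := by
  induction cs using verifcBTok.induct with
  | case1 => simp [verifcBTok, pvToks]
  | case2 c cs hd ih =>
      have hrun : ∀ x ∈ (c :: cs).takeWhile PySem.Chars.isdigit, PySem.Chars.isdigit x = true :=
        fun x hx => List.mem_takeWhile_imp hx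
      have hsplit : pvToks [] (c :: cs)
          = pvToks ((c :: cs).takeWhile PySem.Chars.isdigit)
              ((c :: cs).dropWhile PySem.Chars.isdigit) := by
        conv_lhs => rw [← List.takeWhile_append_dropWhile (p := PySem.Chars.isdigit) (l := c :: cs)]
        rw [pvToks_append _ _ _ hrun]; simp
      have hne : ((c :: cs).takeWhile PySem.Chars.isdigit).isEmpty = false := by
        simp [hd]
      rw [verifcBTok, if_pos hd, hsplit, ih]
      rcases hrest : (c :: cs).dropWhile PySem.Chars.isdigit with _ | ⟨r, rs⟩
      · simp [pvToks, hne, verifcAVal]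
      · have hr : PySem.Chars.isdigit r = false := by
          have := List.head_dropWhile_not (p := PySem.Chars.isdigit) (l := c :: cs)
            (by simp [hrest])
          simpa [hrest] using this
        simp [pvToks, hne, hr, verifcAVal]
  | case3 c cs hd ih =>
      rw [verifcBTok, if_neg hd, ih, pvToks, if_neg hd]
      simp

-- A's remove pass decides sub-multiset containment of the token values in ll
theorem pvChk_iff_subperm (toks : List (List Char)) : ∀ (ll : List Int),
    pvChk ll toks = true ↔ List.Subperm (toks.map verifcAVal) ll := by
  induction toks with
  | nil => intro ll; simp [pvChk, List.nil_subperm]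
  | cons t ts ih =>
      intro ll
      by_cases hv : verifcAVal t ∈ ll
      · have hperm : List.Perm ll (verifcAVal t :: ll.erase (verifcAVal t)) := List.perm_cons_erase hv
        rw [pvChk, if_pos (by simpa using hv),
          PySem.List.remove?_eq_some_erase ll _ hv, Option.getD_some, List.map_cons]
        rw [ih, ← List.subperm_cons (verifcAVal t), ← hperm.subperm_left]
      · rw [pvChk, if_neg (by simpa using hv)]
        simp only [List.map_cons, Bool.false_eq_true, false_iff]
        intro h
        exact hv (h.subset (by simp))

-- the greedy scan empties nd exactly when nd is a subsequence of hv
theorem pvGreedy_nil_iff (hv : List Int) : ∀ nd : List Int,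
    pvGreedy nd hv = [] ↔ List.Sublist nd hv := by
  induction hv with
  | nil => intro nd; simp [pvGreedy]
  | cons x hv ih =>
      intro nd
      rcases nd with _ | ⟨n, nd'⟩
      · simp [pvGreedy]
      · rw [pvGreedy]
        by_cases he : n = x
        · subst he
          rw [if_pos rfl, ih]
          exact (List.cons_sublist_cons).symm
        · rw [if_neg he, ih]
          constructor
          · exact fun h => h.cons x
          · intro h
            cases h with
            | cons _ h => exact h
            | cons₂ => exact absurd rfl he

theorem foldl_stay (need : List Int) (hv : List Int) :
    hv.foldl (fun k x => if k < need.length && need.getD k 0 == x then k + 1 else k)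
      need.length = need.length := by
  induction hv with
  | nil => rfl
  | cons x hv ih => rw [List.foldl_cons, if_neg (by simp)]; exact ih

-- B's fold reaches len(need) exactly when the greedy scan empties the unmatched suffix
theorem foldl_eq_iff_greedy (need : List Int) : ∀ (hv : List Int) (k : Nat), k ≤ need.length →
    (hv.foldl (fun k x => if k < need.length && need.getD k 0 == x then k + 1 else k) k
        = need.length ↔ pvGreedy (need.drop k) hv = []) := by
  intro hv
  induction hv with
  | nil =>
      intro k hk
      simp only [List.foldl_nil, pvGreedy]
      rw [List.drop_eq_nil_iff]
      omega
  | cons x hv ih =>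
      intro k hk
      by_cases hlt : k < need.length
      · have hdrop : need.drop k = need[k] :: need.drop (k + 1) :=
          List.drop_eq_getElem_cons hlt
        have hgetD : need.getD k 0 = need[k] := List.getD_eq_getElem _ _ hlt
        rw [List.foldl_cons, hdrop, pvGreedy]
        by_cases he : need[k] = x
        · rw [if_pos (by rw [hgetD]; simp [hlt, he]), if_pos he]
          exact ih (k + 1) hlt
        · rw [if_neg (by rw [hgetD]; simp [he]), if_neg he, ← hdrop]
          exact ih k hk
      · have hkeq : k = need.length := by omega
        subst hkeq
        rw [List.foldl_cons, if_neg (by simp), foldl_stay,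
          List.drop_eq_nil_iff.mpr (le_refl _)]
        simp [pvGreedy]

-- ===== VERDICT =====
theorem verifc_spec : Claim_equal_verifc := by
  intro l comb _
  unfold Spec_verifc verifc verifc_alt
  rw [verifcALoop_eq_chk, bTok_eq_toks]
  rw [Bool.eq_iff_iff, pvChk_iff_subperm, beq_iff_eq,
    foldl_eq_iff_greedy _ _ 0 (Nat.zero_le _), List.drop_zero, pvGreedy_nil_iff]
  constructor
  · intro hsub
    refine List.sublist_of_subperm_of_pairwise (r := fun a b : Int => a ≤ b) ?_
      ?_ ?_
    · rw [(PySem.List.sorted_perm _ _ _).subperm_right,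
        (PySem.List.sorted_perm _ _ _).subperm_left]
      exact hsub
    · simpa using PySem.List.sorted_pairwise (xs := (pvToks [] comb.toList).map verifcAVal)
        (key := fun x => x)
    · simpa using PySem.List.sorted_pairwise (xs := l) (key := fun x => x)
  · intro hsl
    have := hsl.subperm
    rw [(PySem.List.sorted_perm _ _ _).subperm_right,
      (PySem.List.sorted_perm _ _ _).subperm_left] at this
    exact this
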